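-- pv_equiv track=rewrite | github.com/aderaa/iServer-Hirearchy-SQL-Generator | app.py | make_unique_alias
-- ===== SOURCE A (Python) =====
-- def make_unique_alias(base_alias: str, level_tag: str, used: set) -> str:
--     """Ensure output alias is unique (required for derived-table wrapper)."""
--     base_alias = (base_alias or "").strip() or "عمود"
--     level_tag = (level_tag or "").strip()
--
--     candidate = base_alias
--     if candidate in used:
--         candidate = f"{base_alias} - {level_tag}" if level_tag else f"{base_alias} - مستوى"
--
--     n = 2
--     while candidate in used:
--         candidate = f"{base_alias} - {level_tag} ({n})" if level_tag else f"{base_alias} ({n})"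
--         n += 1
--
--     used.add(candidate)
--     return candidate
-- ===== SOURCE B (Python) =====
-- def make_unique_alias(base_alias: str, level_tag: str, used: set) -> str:
--     """One-pass alternative: instead of probing candidate after candidate against `used`,
--     winnow `used` once into the set of numeric suffixes already taken for this prefix and
--     pick the smallest free number (same mutation of `used` as A: the result is added)."""
--     base = (base_alias or "").strip() or "عمود"
--     tag = (level_tag or "").strip()
--     if base not in used:
--         used.add(base)
--         return base
--     special = f"{base} - {tag}" if tag else f"{base} - مستوى"
--     if special not in used:
--         used.add(special)
--         return special
--     prefix = f"{base} - {tag} (" if tag else f"{base} ("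
--     taken = {s[len(prefix):-1] for s in used
--              if s.startswith(prefix) and s.endswith(")")}
--     n = 2
--     while str(n) in taken:
--         n += 1
--     chosen = f"{prefix}{n})"
--     used.add(chosen)
--     return chosen
-- ===== Notes on version B (the rewrite author's own statement) =====
-- stated objective: alternative
-- what changed: A probes candidate strings one by one against the used set; B handles the two fixed candidates with early returns and then, instead of probing, winnows `used` in one pass into the set of numeric suffixes already taken for the computed prefix and picks the smallest free number >= 2.
import Mathlib
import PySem

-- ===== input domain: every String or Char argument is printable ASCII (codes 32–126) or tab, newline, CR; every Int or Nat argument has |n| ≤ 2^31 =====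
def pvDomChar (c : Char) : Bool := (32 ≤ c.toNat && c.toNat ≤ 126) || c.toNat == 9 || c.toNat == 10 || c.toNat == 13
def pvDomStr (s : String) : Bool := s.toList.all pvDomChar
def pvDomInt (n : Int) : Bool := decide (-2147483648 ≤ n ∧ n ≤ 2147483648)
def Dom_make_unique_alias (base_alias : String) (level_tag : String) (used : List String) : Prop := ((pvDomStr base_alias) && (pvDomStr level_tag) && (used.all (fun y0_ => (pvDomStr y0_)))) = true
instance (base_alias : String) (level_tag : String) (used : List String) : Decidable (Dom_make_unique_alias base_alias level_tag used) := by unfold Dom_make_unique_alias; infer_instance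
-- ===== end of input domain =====

-- B replaces A's probe-candidates-one-by-one search by early returns for the two fixed candidates
-- plus ONE filtering pass over `used` that extracts the numeric suffixes already taken for the
-- computed prefix, then picks the smallest free number ≥ 2. Both Pythons mutate `used` identically
-- (the returned alias is added); the equivalence proved here is about the RETURN value.

-- ===== PORT A =====
-- `(s or "").strip() or "عمود"` (both Pythons share this line)
def pvNormBase (base_alias : String) : String :=
  let b := PySem.Str.strip base_alias
  if b = "" then "عمود" else b

-- the `while candidate in used:` loop; fuel = used.length + 1 is always enough in Python
-- (each rejected candidate is a distinct member of `used`), so the fuel guard is unreachable.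
-- f"...{n}..." is ported by hand as string append of PySem.Int.toStr (exact: str(n) on ints).
def pvLoopA (base tag : String) (used : List String) (candidate : String) (n : Nat) (fuel : Nat) : String :=
  match fuel with
  | 0 => candidate
  | fuel + 1 =>
    if candidate ∈ used then
      pvLoopA base tag used
        (if tag = "" then base ++ " (" ++ PySem.Int.toStr (n : Int) ++ ")"
         else base ++ " - " ++ tag ++ " (" ++ PySem.Int.toStr (n : Int) ++ ")")
        (n + 1) fuel
    else candidate

def make_unique_alias (base_alias : String) (level_tag : String) (used : List String) : String :=
  let base := pvNormBase base_alias
  let tag := PySem.Str.strip level_tag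
  let candidate := base
  let candidate :=
    if candidate ∈ used then
      (if tag = "" then base ++ " - مستوى" else base ++ " - " ++ tag)
    else candidate
  pvLoopA base tag used candidate 2 (used.length + 1)

-- ===== PORT B =====
-- s.startswith(prefix) realised as stripping the prefix (none = no match)
def pvStripPrefix? : List Char → List Char → Option (List Char)
  | [], s => some s
  | _ :: _, [] => none
  | p :: ps, c :: cs => if c = p then pvStripPrefix? ps cs else none

-- `s.startswith(prefix) and s.endswith(")")`, then `s[len(prefix):-1]`; exact here because the
-- prefix B passes always ends with '(' , so s = prefix alone can never pass the endswith test.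
def pvMidOf (p : List Char) (s : String) : Option String :=
  match pvStripPrefix? p s.toList with
  | none => none
  | some rest => if rest.getLast? = some ')' then some (String.ofList rest.dropLast) else none

-- `n = 2; while str(n) in taken: n += 1`; fuel = used.length suffices in the reachable branch
-- (base and special are members of used and contribute nothing to taken, so at most
-- used.length - 1 probes can hit), hence the fuel guard is unreachable.
def pvMex (taken : List String) (n : Nat) (fuel : Nat) : Nat :=
  match fuel with
  | 0 => n
  | fuel + 1 => if PySem.Int.toStr (n : Int) ∈ taken then pvMex taken (n + 1) fuel else n

def make_unique_alias_alt (base_alias : String) (level_tag : String) (used : List String) : String :=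
  let base := pvNormBase base_alias
  let tag := PySem.Str.strip level_tag
  if base ∉ used then base
  else
    let special := if tag = "" then base ++ " - مستوى" else base ++ " - " ++ tag
    if special ∉ used then special
    else
      let pre := if tag = "" then base ++ " (" else base ++ " - " ++ tag ++ " ("
      let taken := used.filterMap (pvMidOf pre.toList)
      pre ++ PySem.Int.toStr ((pvMex taken 2 used.length : Nat) : Int) ++ ")"

-- ===== PRECONDITION & SPEC =====
def Spec_make_unique_alias (base_alias : String) (level_tag : String) (used : List String) (out : String) : Prop := out = make_unique_alias_alt base_alias level_tag used
instance (base_alias : String) (level_tag : String) (used : List String) (out : String) : Decidable (Spec_make_unique_alias base_alias level_tag used out) := by unfold Spec_make_unique_alias; infer_instance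

-- ===== CLAIM (what is proved, stated in full; the proofs are below) =====
def Claim_equal_make_unique_alias : Prop := ∀ (base_alias : String) (level_tag : String) (used : List String), Dom_make_unique_alias base_alias level_tag used → Spec_make_unique_alias base_alias level_tag used (make_unique_alias base_alias level_tag used)

-- ===== LEMMAS AND PROOFS =====

theorem pvStripPrefix?_append (p r : List Char) : pvStripPrefix? p (p ++ r) = some r := by
  induction p with
  | nil => rfl
  | cons c cs ih => simp [pvStripPrefix?, ih]

theorem pvStripPrefix?_eq_some {p l r : List Char} (h : pvStripPrefix? p l = some r) :
    l = p ++ r := by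
  induction p generalizing l with
  | nil => simpa [pvStripPrefix?] using h
  | cons c cs ih =>
    cases l with
    | nil => simp [pvStripPrefix?] at h
    | cons d ds =>
      by_cases hd : d = c
      · subst hd; simp only [pvStripPrefix?] at h
        simpa using ih h
      · simp [pvStripPrefix?, hd] at h

theorem pvMidOf_eq_some_iff (p : List Char) (s m : String) :
    pvMidOf p s = some m ↔ s.toList = p ++ m.toList ++ [')'] := by
  constructor
  · intro h
    unfold pvMidOf at h
    cases hsp : pvStripPrefix? p s.toList with
    | none => rw [hsp] at h; exact absurd h (by simp)
    | some rest =>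
      rw [hsp] at h
      by_cases hl : rest.getLast? = some ')'
      · simp only [hl, if_true] at h
        simp only [Option.some.injEq] at h
        have hm : m = String.ofList rest.dropLast := h.symm
        have hne : rest ≠ [] := by
          intro hn; rw [hn] at hl; simp at hl
        have hlast : rest.getLast hne = ')' := by
          have := List.getLast?_eq_some_getLast (l := rest) hne
          rw [hl] at this; exact (Option.some.inj this).symm
        have hrest : rest = rest.dropLast ++ [')'] := by
          conv_lhs => rw [← List.dropLast_concat_getLast hne]
          rw [hlast]
        rw [pvStripPrefix?_eq_some hsp, hrest, hm]
        simp
      · simp [hl] at h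
  · intro h
    unfold pvMidOf
    rw [h, List.append_assoc, pvStripPrefix?_append]
    simp

theorem mem_taken_iff (pre : String) (used : List String) (x : String) :
    (pre ++ x ++ ")") ∈ used ↔ x ∈ used.filterMap (pvMidOf pre.toList) := by
  rw [List.mem_filterMap]
  constructor
  · intro h
    exact ⟨_, h, (pvMidOf_eq_some_iff _ _ _).2 (by simp)⟩
  · rintro ⟨s, hs, hparse⟩
    have := (pvMidOf_eq_some_iff _ _ _).1 hparse
    have hseq : s = pre ++ x ++ ")" := by
      apply String.ext
      simpa using this
    rwa [← hseq]

-- candidate number n of A's while loop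
def pvCandN (pre : String) (n : Nat) : String := pre ++ PySem.Int.toStr (n : Int) ++ ")"

theorem candN_eq (base tag : String) (n : Nat) :
    (if tag = "" then base ++ " (" ++ PySem.Int.toStr (n : Int) ++ ")"
     else base ++ " - " ++ tag ++ " (" ++ PySem.Int.toStr (n : Int) ++ ")")
    = pvCandN (if tag = "" then base ++ " (" else base ++ " - " ++ tag ++ " (") n := by
  by_cases h : tag = "" <;> simp [pvCandN, h, String.append_assoc]

-- A's while loop, at candidate pvCandN pre m with counter m+1, is B's mex search from m (same fuel)
theorem pvLoopA_eq_mex (base tag : String) (used : List String) (pre : String)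
    (hpre : pre = if tag = "" then base ++ " (" else base ++ " - " ++ tag ++ " (") :
    ∀ (fuel m : Nat),
      pvLoopA base tag used (pvCandN pre m) (m + 1) fuel
        = pvCandN pre (pvMex (used.filterMap (pvMidOf pre.toList)) m fuel) := by
  intro fuel
  induction fuel with
  | zero => intro m; simp [pvLoopA, pvMex]
  | succ fuel ih =>
    intro m
    have hmem : (pvCandN pre m ∈ used) ↔
        PySem.Int.toStr (m : Int) ∈ used.filterMap (pvMidOf pre.toList) :=
      mem_taken_iff pre used _
    simp only [pvLoopA, pvMex]
    by_cases h : pvCandN pre m ∈ used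
    · rw [if_pos h, if_pos (hmem.1 h), candN_eq base tag (m + 1), ← hpre]
      exact ih (m + 1)
    · rw [if_neg h, if_neg (fun hc => h (hmem.2 hc))]

theorem make_unique_alias_eq (base_alias level_tag : String) (used : List String) :
    make_unique_alias base_alias level_tag used = make_unique_alias_alt base_alias level_tag used := by
  unfold make_unique_alias make_unique_alias_alt
  set base := pvNormBase base_alias with hbase
  set tag := PySem.Str.strip level_tag with htag
  by_cases hb : base ∈ used
  · -- base taken: A enters the loop at the special form
    simp only [hb, if_true]
    set special := (if tag = "" then base ++ " - مستوى" else base ++ " - " ++ tag) with hsp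
    by_cases hs : special ∈ used
    · -- special taken too: one loop step, then the loop ↔ mex correspondence with equal fuel
      simp only [hs]
      show pvLoopA base tag used special 2 (used.length + 1) = _
      simp only [pvLoopA, if_pos hs]
      rw [candN_eq base tag 2]
      rw [pvLoopA_eq_mex base tag used _ rfl used.length 2]
      simp [pvCandN]
    · simp only [hs, not_false_iff, if_pos trivial]
      show pvLoopA base tag used special 2 (used.length + 1) = special
      simp [pvLoopA, hs]
  · simp only [hb, if_false, not_false_iff, if_pos trivial]
    show pvLoopA base tag used base 2 (used.length + 1) = base
    simp [pvLoopA, hb]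

-- ===== VERDICT (by name: the statement is the Claim_ definition above) =====
theorem make_unique_alias_spec : Claim_equal_make_unique_alias := by
  intro base_alias level_tag used _
  unfold Spec_make_unique_alias
  exact make_unique_alias_eq base_alias level_tag used
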